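-- pv_equiv track=rewrite | github.com/romeech/advent_of_code | 2024/day_01/py/main.py | calc_similarity_score
-- ===== SOURCE A (Python) =====
-- def calc_similarity_score(left, right):
--     similarity_score = 0
--
--     for lv in left:
--         try:
--             r_idx = right.index(lv)
--         except ValueError:
--             r_idx = -1
--
--         count = 0
--         if r_idx > -1:
--             while right[r_idx] == lv:
--                 count += 1
--                 r_idx += 1
--
--         similarity_score += lv * count
--
--     return similarity_score
-- ===== SOURCE B (Python) =====
-- def calc_similarity_score(left, right):
--     # One grouping pass over right: record the length of the FIRST contiguous
--     # run of each value (later runs of the same value are ignored, matching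
--     # index()+while in the original), then one lookup pass over left.
--     first_run = {}
--     i = 0
--     n = len(right)
--     while i < n:
--         v = right[i]
--         j = i + 1
--         while j < n and right[j] == v:
--             j += 1
--         if v not in first_run:
--             first_run[v] = j - i
--         i = j
--     return sum(lv * first_run.get(lv, 0) for lv in left)
-- ===== Notes on version B (the rewrite author's own statement) =====
-- stated objective: faster
-- what changed: Instead of scanning right once per element of left (index() then a while over the run), B makes a single grouping pass over right that records each value's first contiguous run length in a dict, then sums lv * table lookup over left.
import Mathlib
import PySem

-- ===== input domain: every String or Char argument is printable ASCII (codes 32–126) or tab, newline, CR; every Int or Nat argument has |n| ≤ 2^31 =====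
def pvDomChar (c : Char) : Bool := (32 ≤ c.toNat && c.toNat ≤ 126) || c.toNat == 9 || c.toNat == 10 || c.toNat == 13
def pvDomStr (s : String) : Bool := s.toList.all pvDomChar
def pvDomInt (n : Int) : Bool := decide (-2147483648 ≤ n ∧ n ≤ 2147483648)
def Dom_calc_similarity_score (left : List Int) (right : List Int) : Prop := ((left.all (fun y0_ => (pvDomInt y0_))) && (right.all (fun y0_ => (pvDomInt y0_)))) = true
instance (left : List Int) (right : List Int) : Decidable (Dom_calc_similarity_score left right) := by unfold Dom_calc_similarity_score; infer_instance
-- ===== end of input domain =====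

-- B replaces A's per-left-element scans of right (index() plus a while over the run) by ONE
-- grouping pass over right recording each value's first contiguous run length in a dict,
-- then a single lookup pass over left. While loops are ported with a fuel argument
-- (initialised to right.length, enough since the index strictly increases each step).

-- ===== PORT A =====
-- A's `while right[r_idx] == lv` loop; the out-of-range branch is where Python
-- raises IndexError (the run reaches the end of right), excluded by Pre_
def pvCountRun (right : List Int) (lv : Int) : Nat → Nat → Int
  | _, 0 => 0
  | i, fuel + 1 =>
    if h : i < right.length then
      if right[i] = lv then 1 + pvCountRun right lv (i + 1) fuel else 0
    else 0

def calc_similarity_score (left : List Int) (right : List Int) : Int :=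
  left.foldl (fun acc lv =>
    let r_idx : Int := match PySem.List.index? right lv with
      | some k => (k : Int)
      | none => -1
    let count : Int := if r_idx > -1 then pvCountRun right lv r_idx.toNat right.length else 0
    acc + lv * count) 0

-- ===== PORT B =====
-- Source B's inner `while j < n and right[j] == v` loop
def pvScanRun (right : List Int) (v : Int) : Nat → Nat → Nat
  | j, 0 => j
  | j, fuel + 1 =>
    if h : j < right.length then
      if right[j] = v then pvScanRun right v (j + 1) fuel else j
    else j

-- Source B's outer `while i < n` grouping loop
def pvBuildRuns (right : List Int) : Nat → Nat → PySem.Dict Int Int → PySem.Dict Int Int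
  | _, 0, d => d
  | i, fuel + 1, d =>
    if h : i < right.length then
      let v := right[i]
      let j := pvScanRun right v (i + 1) right.length
      pvBuildRuns right j fuel (if d.contains v then d else d.insert v ((j : Int) - (i : Int)))
    else d

def calc_similarity_score_alt (left : List Int) (right : List Int) : Int :=
  let first_run := pvBuildRuns right 0 right.length PySem.Dict.empty
  left.foldl (fun acc lv => acc + lv * first_run.getD lv 0) 0

-- ===== PRECONDITION & SPEC =====
-- Pre_ excludes exactly the inputs where A RAISES IndexError: some lv in left occurs in
-- right and its first contiguous run extends to the very end of right, so A's while
-- loop walks past the last index (e.g. left=[1], right=[1]); B returns the score there.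
def Pre_calc_similarity_score (left : List Int) (right : List Int) : Prop :=
  ∀ lv ∈ left, lv ∈ right →
    ¬ ((right.drop (right.idxOf lv)).all (fun x => x == lv) = true)
instance (left : List Int) (right : List Int) : Decidable (Pre_calc_similarity_score left right) := by
  unfold Pre_calc_similarity_score; infer_instance

def pvWitness_calc_similarity_score : List Int × List Int := ([1, 2], [2, 2, 3])

def Spec_calc_similarity_score (left : List Int) (right : List Int) (out : Int) : Prop := out = calc_similarity_score_alt left right
instance (left : List Int) (right : List Int) (out : Int) : Decidable (Spec_calc_similarity_score left right out) := by unfold Spec_calc_similarity_score; infer_instance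

-- ===== CLAIM (what is proved, stated in full; the proofs are below) =====
def Claim_equal_calc_similarity_score : Prop := ∀ (left : List Int) (right : List Int), Dom_calc_similarity_score left right → Pre_calc_similarity_score left right → Spec_calc_similarity_score left right (calc_similarity_score left right)

-- ===== LEMMAS AND PROOFS =====

-- length of the FIRST contiguous run of v in l (0 if v absent): the common
-- characterisation both ports are reduced to
def pvFR : List Int → Int → Int
  | [], _ => 0
  | x :: t, v => if x = v then 1 + ((t.takeWhile (fun y => y == v)).length : Int) else pvFR t v

theorem pvFR_not_mem (l : List Int) (v : Int) (h : v ∉ l) : pvFR l v = 0 := by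
  induction l with
  | nil => rfl
  | cons x t ih =>
    simp only [List.mem_cons, not_or] at h
    simp [pvFR, Ne.symm h.1, ih h.2]

theorem pvFR_append_first (pre suf : List Int) (v : Int) (h : v ∉ pre) :
    pvFR (pre ++ v :: suf) v = 1 + ((suf.takeWhile (fun y => y == v)).length : Int) := by
  induction pre with
  | nil => simp [pvFR]
  | cons x t ih =>
    simp only [List.mem_cons, not_or] at h
    simp [pvFR, Ne.symm h.1, ih h.2]

theorem pvFR_dropWhile (t : List Int) (v w : Int) (hne : v ≠ w) :
    pvFR (t.dropWhile (fun y => y == w)) v = pvFR t v := by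
  induction t with
  | nil => rfl
  | cons x t ih =>
    by_cases hx : x = w
    · subst hx
      simpa [List.dropWhile, pvFR, Ne.symm hne] using ih
    · simp [List.dropWhile, beq_eq_false_iff_ne.mpr hx]

theorem pvDrop_takeWhile (l : List Int) (p : Int → Bool) :
    l.drop (l.takeWhile p).length = l.dropWhile p := by
  induction l with
  | nil => rfl
  | cons x t ih => by_cases hx : p x <;> simp [List.takeWhile, List.dropWhile, hx, ih]

theorem pvCountRun_eq (right : List Int) (lv : Int) (fuel : Nat) :
    ∀ i, right.length - i ≤ fuel →
      pvCountRun right lv i fuel = (((right.drop i).takeWhile (fun y => y == lv)).length : Int) := by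
  induction fuel with
  | zero =>
    intro i hi
    rw [List.drop_eq_nil_of_le (by omega)]
    simp [pvCountRun]
  | succ fuel ih =>
    intro i hi
    by_cases h : i < right.length
    · rw [List.drop_eq_getElem_cons h]
      by_cases hv : right[i] = lv
      · simp [pvCountRun, h, hv, List.takeWhile, ih (i + 1) (by omega)]
        omega
      · simp [pvCountRun, h, hv, List.takeWhile, beq_eq_false_iff_ne.mpr hv]
    · rw [List.drop_eq_nil_of_le (by omega)]
      simp [pvCountRun, h]

theorem pvScanRun_eq (right : List Int) (v : Int) (fuel : Nat) :
    ∀ j, right.length - j ≤ fuel →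
      pvScanRun right v j fuel = j + ((right.drop j).takeWhile (fun y => y == v)).length := by
  induction fuel with
  | zero =>
    intro j hj
    rw [List.drop_eq_nil_of_le (by omega)]
    simp [pvScanRun]
  | succ fuel ih =>
    intro j hj
    by_cases h : j < right.length
    · rw [List.drop_eq_getElem_cons h]
      by_cases hv : right[j] = v
      · simp [pvScanRun, h, hv, List.takeWhile, ih (j + 1) (by omega)]
        omega
      · simp [pvScanRun, h, hv, List.takeWhile, beq_eq_false_iff_ne.mpr hv]
    · rw [List.drop_eq_nil_of_le (by omega)]
      simp [pvScanRun, h]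

theorem pvBuildRuns_getD (right : List Int) (v' : Int) (fuel : Nat) :
    ∀ i d, right.length - i ≤ fuel →
      (pvBuildRuns right i fuel d).getD v' 0 =
        if d.contains v' then d.getD v' 0 else pvFR (right.drop i) v' := by
  induction fuel with
  | zero =>
    intro i d hi
    have hd : right.drop i = [] := List.drop_eq_nil_of_le (by omega)
    rw [hd]
    by_cases hc : d.contains v'
    · simp [pvBuildRuns, hc]
    · have hcf : d.contains v' = false := by simpa using hc
      simp [pvBuildRuns, hc, PySem.Dict.getD_of_not_contains d 0 hcf, pvFR]
  | succ fuel ih =>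
    intro i d hi
    by_cases h : i < right.length
    · have hj : pvScanRun right right[i] (i + 1) right.length
          = i + 1 + ((right.drop (i + 1)).takeWhile (fun y => y == right[i])).length :=
        pvScanRun_eq right right[i] right.length (i + 1) (by omega)
      have hdropi : right.drop i = right[i] :: right.drop (i + 1) := List.drop_eq_getElem_cons h
      have hdropj : right.drop (pvScanRun right right[i] (i + 1) right.length)
          = (right.drop (i + 1)).dropWhile (fun y => y == right[i]) := by
        rw [hj, ← pvDrop_takeWhile (right.drop (i + 1)) (fun y => y == right[i]),
          List.drop_drop]
      rw [show pvBuildRuns right i (fuel + 1) d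
          = pvBuildRuns right (pvScanRun right right[i] (i + 1) right.length) fuel
              (if d.contains right[i] then d else d.insert right[i]
                ((pvScanRun right right[i] (i + 1) right.length : Int) - (i : Int)))
        from by simp [pvBuildRuns, h]]
      rw [ih _ _ (by rw [hj]; omega)]
      by_cases hv' : v' = right[i]
      · subst hv'
        by_cases hc : d.contains right[i]
        · simp [hc]
        · simp only [hc, Bool.false_eq_true, if_false, PySem.Dict.contains_insert_self,
            if_true, PySem.Dict.getD_insert_self, hdropi, pvFR, if_pos rfl, hj]
          omega
      · have hfr : pvFR (right.drop (pvScanRun right right[i] (i + 1) right.length)) v'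
            = pvFR (right.drop (i + 1)) v' := by
          rw [hdropj]; exact pvFR_dropWhile _ v' right[i] hv'
        have hfr2 : pvFR (right.drop i) v' = pvFR (right.drop (i + 1)) v' := by
          rw [hdropi]; simp [pvFR, Ne.symm hv']
        by_cases hc : d.contains right[i]
        · simp [hc, hfr, hfr2]
        · simp [hc, PySem.Dict.contains_insert, hv', PySem.Dict.getD_insert, hfr, hfr2]
    · have hd : right.drop i = [] := List.drop_eq_nil_of_le (by omega)
      rw [hd]
      by_cases hc : d.contains v'
      · simp [pvBuildRuns, h, hc]
      · have hcf : d.contains v' = false := by simpa using hc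
        simp [pvBuildRuns, h, hc, PySem.Dict.getD_of_not_contains d 0 hcf, pvFR]

theorem pvCount_eq_pvFR (right : List Int) (lv : Int) :
    (let r_idx : Int := match PySem.List.index? right lv with
      | some k => (k : Int)
      | none => -1
     if r_idx > -1 then pvCountRun right lv r_idx.toNat right.length else 0) = pvFR right lv := by
  rcases h : PySem.List.index? right lv with _ | k
  · have hnm : lv ∉ right := (PySem.List.index?_eq_none_iff right lv).mp h
    simp [pvFR_not_mem right lv hnm]
  · obtain ⟨pre, suf, hdec, hlen, hnm⟩ := (PySem.List.index?_eq_some_iff right lv k).mp h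
    subst hdec hlen
    have hgt : ((pre.length : Int) > -1) := by omega
    simp only [if_pos hgt, Int.toNat_natCast]
    rw [pvCountRun_eq (pre ++ lv :: suf) lv _ pre.length (by omega), List.drop_left,
      pvFR_append_first pre suf lv hnm]
    simp [List.takeWhile]
    omega

-- ===== VERDICT (by name: the statement is the Claim_ definition above) =====
theorem calc_similarity_score_spec : Claim_equal_calc_similarity_score := by
  intro left right _ _
  unfold Spec_calc_similarity_score calc_similarity_score calc_similarity_score_alt
  apply PySem.List.foldl_congr_mem
  intro acc lv _
  have hb := pvBuildRuns_getD right lv right.length 0 PySem.Dict.empty (by omega)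
  simp only [PySem.Dict.contains_empty, Bool.false_eq_true, if_false, List.drop_zero] at hb
  rw [hb, ← pvCount_eq_pvFR right lv]
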